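-- pv_equiv track=rewrite | github.com/SuyeonChoi/Algorithms | CodingTest/codility_1.py | solution
-- ===== SOURCE A (Python) =====
-- def solution(A):
--     N = len(A)
--     M = len(A[0])
--     equilibrium = 0
--     upper_P = 0
--     lower_P = 0
--     for i in range(N):
--         lower_P += sum(A[i])
--     right_q = 0
--     for i in range(1, M):
--         for j in range(N):
--             right_q += A[j][i]
--
--     for P in range(N):
--         if P > 0:
--             upper_P += sum(A[P-1])
--         lower_P -= sum(A[P])
--         left_Q = 0
--         right_Q = right_q
--         for Q in range(M):
--             if Q > 0:
--                 delete_right = 0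
--                 add_left = 0
--                 for i in range(N):
--                     delete_right += A[i][Q]
--                     add_left += A[i][Q-1]
--                 right_Q -= delete_right
--                 left_Q += add_left
--             if(left_Q == right_Q and lower_P == upper_P):
--                 equilibrium += 1
--     return equilibrium
-- ===== SOURCE B (Python) =====
-- def _count_balanced(sums):
--     total = sum(sums)
--     count = 0
--     before = 0
--     for s in sums:
--         if before == total - before - s:
--             count += 1
--         before += s
--     return count
--
--
-- def solution(A):
--     M = len(A[0])
--     row_sums = [sum(r) for r in A]
--     col_sums = [sum(r[j] for r in A) for j in range(M)]
--     return _count_balanced(row_sums) * _count_balanced(col_sums)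
-- ===== Notes on version B (the rewrite author's own statement) =====
-- stated objective: faster
-- what changed: B precomputes row sums and column sums once, counts balanced horizontal cuts and balanced vertical cuts in two independent single passes and multiplies the counts, instead of A's outer loop that rebuilds every column sum from scratch inside the inner loop. Pre_ excludes empty grids and ragged grids having a row shorter than row 0: on those Python A raises IndexError except when row 0 has length at most 1 (the short rows are then never column-indexed and A still returns), while B's column-sum pass indexes every row and raises there.
-- outside the precondition, e.g. on solution([[1], []]): A returns 1, B raises IndexError
import Mathlib
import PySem

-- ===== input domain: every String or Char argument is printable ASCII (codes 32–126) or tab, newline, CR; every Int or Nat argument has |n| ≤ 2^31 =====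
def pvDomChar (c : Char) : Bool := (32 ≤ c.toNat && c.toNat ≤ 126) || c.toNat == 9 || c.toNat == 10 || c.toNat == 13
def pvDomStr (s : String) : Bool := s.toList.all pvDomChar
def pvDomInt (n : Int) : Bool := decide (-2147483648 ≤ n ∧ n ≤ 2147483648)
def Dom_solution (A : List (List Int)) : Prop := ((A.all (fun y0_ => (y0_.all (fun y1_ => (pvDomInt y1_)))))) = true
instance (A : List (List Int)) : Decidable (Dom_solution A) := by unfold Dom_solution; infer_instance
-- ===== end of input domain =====

-- B counts balanced row cuts and balanced column cuts independently from precomputed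
-- row/column sums and multiplies the two counts, instead of A's per-cell rescans.

-- ===== PORT A =====
def solution (A : List (List Int)) : Int :=
  let N : Int := A.length
  let M : Int := (PySem.List.pyGetD A 0 []).length
  let lower_P0 : Int := (PySem.List.pyRange 0 N 1).foldl
      (fun acc i => acc + (PySem.List.pyGetD A i []).sum) 0
  let right_q : Int := (PySem.List.pyRange 1 M 1).foldl
      (fun acc i => (PySem.List.pyRange 0 N 1).foldl
          (fun acc2 j => acc2 + PySem.List.pyGetD (PySem.List.pyGetD A j []) i 0) acc) 0
  let final := (PySem.List.pyRange 0 N 1).foldl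
      (fun (s : Int × Int × Int) P =>
        let upper_P : Int := if P > 0 then s.2.1 + (PySem.List.pyGetD A (P - 1) []).sum else s.2.1
        let lower_P : Int := s.2.2 - (PySem.List.pyGetD A P []).sum
        let inner := (PySem.List.pyRange 0 M 1).foldl
            (fun (t : Int × Int × Int) Q =>
              let lr : Int × Int :=
                if Q > 0 then
                  let da := (PySem.List.pyRange 0 N 1).foldl
                      (fun (u : Int × Int) i =>
                        (u.1 + PySem.List.pyGetD (PySem.List.pyGetD A i []) Q 0,
                         u.2 + PySem.List.pyGetD (PySem.List.pyGetD A i []) (Q - 1) 0)) (0, 0)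
                  (t.2.1 + da.2, t.2.2 - da.1)
                else (t.2.1, t.2.2)
              (if lr.1 = lr.2 ∧ lower_P = upper_P then t.1 + 1 else t.1, lr.1, lr.2))
            (s.1, 0, right_q)
        (inner.1, upper_P, lower_P))
      (0, 0, lower_P0)
  final.1

-- ===== PORT B =====
def countBalanced (sums : List Int) : Int :=
  let total := sums.sum
  (sums.foldl
      (fun (s : Int × Int) x =>
        ((if s.2 = total - s.2 - x then s.1 + 1 else s.1), s.2 + x))
      (0, 0)).1

def solution_alt (A : List (List Int)) : Int :=
  let M : Int := (PySem.List.pyGetD A 0 []).length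
  let rowSums := A.map (fun r => r.sum)
  let colSums := (PySem.List.pyRange 0 M 1).map
      (fun j => (A.map (fun r => PySem.List.pyGetD r j 0)).sum)
  countBalanced rowSums * countBalanced colSums

-- ===== PRECONDITION & SPEC =====
-- Pre_ excludes empty grids and ragged grids having a row shorter than row 0: on those
-- Python A raises IndexError except when row 0 has length ≤ 1 (the short rows are then
-- never column-indexed and A still returns), while B's column-sum pass raises there.
def Pre_solution (A : List (List Int)) : Prop :=
  A ≠ [] ∧ ∀ r ∈ A, (A.headD []).length ≤ r.length
instance (A : List (List Int)) : Decidable (Pre_solution A) := by unfold Pre_solution; infer_instance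

def pvWitness_solution : List (List Int) := [[1, 2], [3, 0]]

def Spec_solution (A : List (List Int)) (out : Int) : Prop := out = solution_alt A
instance (A : List (List Int)) (out : Int) : Decidable (Spec_solution A out) := by unfold Spec_solution; infer_instance

-- ===== CLAIM (what is proved, stated in full; the proofs are below) =====
def Claim_equal_solution : Prop := ∀ (A : List (List Int)), Dom_solution A → Pre_solution A → Spec_solution A (solution A)

-- ===== LEMMAS AND PROOFS =====

def prefS (f : Int → Int) : Nat → Int
  | 0 => 0
  | k + 1 => prefS f k + f k
def cntI (f : Int → Int) (T : Int) : Nat → Int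
  | 0 => 0
  | k + 1 => cntI f T k + (if prefS f k = T - prefS f k - f k then 1 else 0)
def cntO (f : Int → Int) (T : Int) : Nat → Int
  | 0 => 0
  | k + 1 => cntO f T k + (if T - prefS f k - f k = prefS f k then 1 else 0)
def gS (A : List (List Int)) (P : Int) : Int := (PySem.List.pyGetD A P []).sum
def cS (A : List (List Int)) (Q : Int) : Int := (A.map (fun r => PySem.List.pyGetD r Q 0)).sum

theorem cntO_eq_cntI (f : Int → Int) (T : Int) (n : Nat) : cntO f T n = cntI f T n := by
  induction n with
  | zero => rfl
  | succ k ih => simp only [cntO, cntI, ih, eq_comm]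

theorem innerLoop_eq (f : Int → Int) (T e : Int) (c : Prop) [Decidable c] :
    ∀ n : Nat, 1 ≤ n →
    (PySem.List.pyRange 0 (n : Int) 1).foldl
      (fun (t : Int × Int × Int) Q =>
        let lr : Int × Int := if Q > 0 then (t.2.1 + f (Q - 1), t.2.2 - f Q) else (t.2.1, t.2.2)
        (if lr.1 = lr.2 ∧ c then t.1 + 1 else t.1, lr.1, lr.2))
      (e, 0, T - f 0)
    = ((e + if c then cntI f T n else 0), prefS f (n - 1),
        T - prefS f (n - 1) - f ((n - 1 : Nat) : Int)) := by
  intro n hn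
  induction n, hn using Nat.le_induction with
  | base =>
      have h1 : ((1 : Nat) : Int) = 0 + 1 := by norm_num
      rw [h1, PySem.List.pyRange_one_singleton]
      simp only [List.foldl, cntI, prefS]
      norm_num
      by_cases hc : c <;> simp [hc] <;> split <;> omega
  | succ k hk ih =>
      obtain ⟨m, rfl⟩ : ∃ m, k = m + 1 := ⟨k - 1, by omega⟩
      have h : ((m + 1 + 1 : Nat) : Int) = ((m + 1 : Nat) : Int) + 1 := by push_cast; ring
      rw [h, PySem.List.pyRange_one_succ_right (by positivity), List.foldl_append, ih]
      simp only [List.foldl, Nat.add_sub_cancel]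
      have hkpos : (((m + 1 : Nat) : Int) > 0) := by positivity
      have hsub : (((m + 1 : Nat) : Int) - 1) = ((m : Nat) : Int) := by push_cast; ring
      simp only [if_pos hkpos, hsub, Prod.mk.injEq]
      have hpref : prefS f (m + 1) = prefS f m + f ((m : Nat) : Int) := rfl
      have hcnt : cntI f T (m + 1 + 1) = cntI f T (m + 1) +
          (if prefS f (m + 1) = T - prefS f (m + 1) - f ((m + 1 : Nat) : Int) then 1 else 0) := rfl
      refine ⟨?_, ?_, ?_⟩
      · by_cases hc : c <;> simp [hc, hcnt, hpref] <;> split <;> split <;> omega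
      · rw [hpref]
      · rw [hpref]; ring

theorem inner_fst (f : Int → Int) (T e r0 : Int) (c : Prop) [Decidable c] (n : Nat)
    (hr : 1 ≤ n → r0 = T - f 0) :
    ((PySem.List.pyRange 0 (n : Int) 1).foldl
      (fun (t : Int × Int × Int) Q =>
        let lr : Int × Int := if Q > 0 then (t.2.1 + f (Q - 1), t.2.2 - f Q) else (t.2.1, t.2.2)
        (if lr.1 = lr.2 ∧ c then t.1 + 1 else t.1, lr.1, lr.2))
      (e, 0, r0)).1
    = e + if c then cntI f T n else 0 := by
  cases n with
  | zero =>
      rw [PySem.List.pyRange_one_eq_nil (by norm_num)]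
      simp [cntI]
  | succ k =>
      rw [hr (by omega), innerLoop_eq f T e c (k + 1) (by omega)]

theorem outerLoop_eq (g : Int → Int) (CC T e : Int) :
    ∀ n : Nat, 1 ≤ n →
    (PySem.List.pyRange 0 (n : Int) 1).foldl
      (fun (s : Int × Int × Int) P =>
        let up : Int := if P > 0 then s.2.1 + g (P - 1) else s.2.1
        let lo : Int := s.2.2 - g P
        (s.1 + (if lo = up then CC else 0), up, lo))
      (e, 0, T)
    = (e + cntO g T n * CC, prefS g (n - 1), T - prefS g (n - 1) - g ((n - 1 : Nat) : Int)) := by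
  intro n hn
  induction n, hn using Nat.le_induction with
  | base =>
      have h1 : ((1 : Nat) : Int) = 0 + 1 := by norm_num
      rw [h1, PySem.List.pyRange_one_singleton]
      simp only [List.foldl, cntO, prefS, Prod.mk.injEq]
      norm_num
  | succ k hk ih =>
      obtain ⟨m, rfl⟩ : ∃ m, k = m + 1 := ⟨k - 1, by omega⟩
      have h : ((m + 1 + 1 : Nat) : Int) = ((m + 1 : Nat) : Int) + 1 := by push_cast; ring
      rw [h, PySem.List.pyRange_one_succ_right (by positivity), List.foldl_append, ih]
      simp only [List.foldl, Nat.add_sub_cancel]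
      have hkpos : (((m + 1 : Nat) : Int) > 0) := by positivity
      have hsub : (((m + 1 : Nat) : Int) - 1) = ((m : Nat) : Int) := by push_cast; ring
      simp only [if_pos hkpos, hsub, Prod.mk.injEq]
      have hpref : prefS g (m + 1) = prefS g m + g ((m : Nat) : Int) := rfl
      have hcnt : cntO g T (m + 1 + 1) = cntO g T (m + 1) +
          (if T - prefS g (m + 1) - g ((m + 1 : Nat) : Int) = prefS g (m + 1) then 1 else 0) := rfl
      refine ⟨?_, ?_, ?_⟩
      · rw [hcnt, hpref, sub_add_eq_sub_sub]
        split <;> ring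
      · rw [hpref]
      · rw [hpref]; ring

theorem outer_fst (g : Int → Int) (CC T e : Int) (n : Nat) :
    ((PySem.List.pyRange 0 (n : Int) 1).foldl
      (fun (s : Int × Int × Int) P =>
        let up : Int := if P > 0 then s.2.1 + g (P - 1) else s.2.1
        let lo : Int := s.2.2 - g P
        (s.1 + (if lo = up then CC else 0), up, lo))
      (e, 0, T)).1
    = e + cntO g T n * CC := by
  cases n with
  | zero =>
      rw [PySem.List.pyRange_one_eq_nil (by norm_num)]
      simp [cntO]
  | succ k => rw [outerLoop_eq g CC T e (k + 1) (by omega)]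

theorem cbLoop_eq (f : Int → Int) (T c0 : Int) :
    ∀ n : Nat,
    (PySem.List.pyRange 0 (n : Int) 1).foldl
      (fun (s : Int × Int) Q => ((if s.2 = T - s.2 - f Q then s.1 + 1 else s.1), s.2 + f Q))
      (c0, 0)
    = (c0 + cntI f T n, prefS f n) := by
  intro n
  induction n with
  | zero => simp [PySem.List.pyRange_one_eq_nil (by norm_num : (0:Int) ≤ 0), cntI, prefS]
  | succ k ih =>
      have h : ((k + 1 : Nat) : Int) = (k : Int) + 1 := by push_cast; ring
      rw [h, PySem.List.pyRange_one_succ_right (by positivity), List.foldl_append, ih]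
      simp only [List.foldl, cntI, prefS]
      split <;> simp <;> ring

theorem da_fst (A : List (List Int)) (Q : Int) :
    (PySem.List.pyRange 0 (A.length : Int) 1).foldl
      (fun acc j => acc + PySem.List.pyGetD (PySem.List.pyGetD A j []) Q 0) 0 = cS A Q := by
  rw [PySem.List.foldl_pyRange_zero_pyGetD' A [] (fun acc r => acc + PySem.List.pyGetD r Q 0) 0,
      PySem.List.foldl_add, zero_add, cS]

theorem rowmap_eq (A : List (List Int)) :
    (PySem.List.pyRange 0 (A.length : Int) 1).map (gS A) = A.map (fun r => r.sum) := by
  conv_rhs => rw [← PySem.List.map_pyGetD_pyRange_zero' A [], List.map_map]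
  rfl

theorem lower0_eq (A : List (List Int)) :
    (PySem.List.pyRange 0 (A.length : Int) 1).foldl
      (fun acc i => acc + (PySem.List.pyGetD A i []).sum) 0
    = (A.map (fun r => r.sum)).sum := by
  rw [PySem.List.foldl_pyRange_zero_pyGetD' A [] (fun acc r => acc + r.sum) 0,
      PySem.List.foldl_add, zero_add]

theorem rq_eq (A : List (List Int)) (M : Int) :
    (PySem.List.pyRange 1 M 1).foldl
      (fun acc i => (PySem.List.pyRange 0 (A.length : Int) 1).foldl
          (fun acc2 j => acc2 + PySem.List.pyGetD (PySem.List.pyGetD A j []) i 0) acc) 0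
    = ((PySem.List.pyRange 1 M 1).map (cS A)).sum := by
  have h : (fun (acc : Int) (i : Int) => (PySem.List.pyRange 0 (A.length : Int) 1).foldl
          (fun acc2 j => acc2 + PySem.List.pyGetD (PySem.List.pyGetD A j []) i 0) acc)
      = fun acc i => acc + cS A i := by
    funext acc i
    rw [PySem.List.foldl_pyRange_zero_pyGetD' A []
          (fun acc2 r => acc2 + PySem.List.pyGetD r i 0) acc,
        PySem.List.foldl_add, cS]
  rw [h, PySem.List.foldl_add, zero_add]

theorem countBalanced_map (f : Int → Int) (n : Nat) :
    countBalanced ((PySem.List.pyRange 0 (n : Int) 1).map f)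
    = cntI f (((PySem.List.pyRange 0 (n : Int) 1).map f).sum) n := by
  unfold countBalanced
  simp only [List.foldl_map]
  rw [cbLoop_eq f _ 0 n]
  simp

-- inner step of port A rewritten to generic shape
theorem innerstep_eq (A : List (List Int)) (c : Prop) [Decidable c] :
    (fun (t : Int × Int × Int) Q =>
      let lr : Int × Int :=
        if Q > 0 then
          let da := (PySem.List.pyRange 0 (A.length : Int) 1).foldl
              (fun (u : Int × Int) i =>
                (u.1 + PySem.List.pyGetD (PySem.List.pyGetD A i []) Q 0,
                 u.2 + PySem.List.pyGetD (PySem.List.pyGetD A i []) (Q - 1) 0)) (0, 0)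
          (t.2.1 + da.2, t.2.2 - da.1)
        else (t.2.1, t.2.2)
      (if lr.1 = lr.2 ∧ c then t.1 + 1 else t.1, lr.1, lr.2))
    = (fun (t : Int × Int × Int) Q =>
      let lr : Int × Int := if Q > 0 then (t.2.1 + cS A (Q - 1), t.2.2 - cS A Q)
        else (t.2.1, t.2.2)
      (if lr.1 = lr.2 ∧ c then t.1 + 1 else t.1, lr.1, lr.2)) := by
  funext t Q
  rw [PySem.List.foldl_prod_mk
        (f := fun a i => a + PySem.List.pyGetD (PySem.List.pyGetD A i []) Q 0)
        (g := fun a i => a + PySem.List.pyGetD (PySem.List.pyGetD A i []) (Q - 1) 0),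
      da_fst, da_fst]

theorem outerstep_eq (A : List (List Int)) (rq : Int) :
    (fun (s : Int × Int × Int) P =>
      let upper_P : Int := if P > 0 then s.2.1 + (PySem.List.pyGetD A (P - 1) []).sum else s.2.1
      let lower_P : Int := s.2.2 - (PySem.List.pyGetD A P []).sum
      let inner := (PySem.List.pyRange 0 ((PySem.List.pyGetD A 0 []).length : Int) 1).foldl
          (fun (t : Int × Int × Int) Q =>
            let lr : Int × Int :=
              if Q > 0 then
                let da := (PySem.List.pyRange 0 (A.length : Int) 1).foldl
                    (fun (u : Int × Int) i =>
                      (u.1 + PySem.List.pyGetD (PySem.List.pyGetD A i []) Q 0,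
                       u.2 + PySem.List.pyGetD (PySem.List.pyGetD A i []) (Q - 1) 0)) (0, 0)
                (t.2.1 + da.2, t.2.2 - da.1)
              else (t.2.1, t.2.2)
            (if lr.1 = lr.2 ∧ lower_P = upper_P then t.1 + 1 else t.1, lr.1, lr.2))
          (s.1, 0, rq)
      (inner.1, upper_P, lower_P))
    = (fun (s : Int × Int × Int) P =>
      let up : Int := if P > 0 then s.2.1 + gS A (P - 1) else s.2.1
      let lo : Int := s.2.2 - gS A P
      (s.1 + (if lo = up then
          cntI (cS A) (cS A 0 + rq) (PySem.List.pyGetD A 0 []).length else 0), up, lo)) := by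
  funext s P
  simp only [innerstep_eq]
  rw [inner_fst (cS A) (cS A 0 + rq) s.1 rq
        (s.2.2 - (PySem.List.pyGetD A P []).sum
          = if P > 0 then s.2.1 + (PySem.List.pyGetD A (P - 1) []).sum else s.2.1)
        (PySem.List.pyGetD A 0 []).length (fun _ => by ring)]
  simp [gS]

theorem solutionA_char (A : List (List Int)) :
    solution A
    = cntO (gS A) ((A.map (fun r => r.sum)).sum) A.length
      * cntI (cS A)
          (cS A 0 + ((PySem.List.pyRange 1 ((PySem.List.pyGetD A 0 []).length : Int) 1).map (cS A)).sum)
          (PySem.List.pyGetD A 0 []).length := by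
  show ((PySem.List.pyRange 0 (A.length : Int) 1).foldl
      (fun (s : Int × Int × Int) P =>
        let upper_P : Int := if P > 0 then s.2.1 + (PySem.List.pyGetD A (P - 1) []).sum else s.2.1
        let lower_P : Int := s.2.2 - (PySem.List.pyGetD A P []).sum
        let inner := (PySem.List.pyRange 0 ((PySem.List.pyGetD A 0 []).length : Int) 1).foldl
            (fun (t : Int × Int × Int) Q =>
              let lr : Int × Int :=
                if Q > 0 then
                  let da := (PySem.List.pyRange 0 (A.length : Int) 1).foldl
                      (fun (u : Int × Int) i =>
                        (u.1 + PySem.List.pyGetD (PySem.List.pyGetD A i []) Q 0,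
                         u.2 + PySem.List.pyGetD (PySem.List.pyGetD A i []) (Q - 1) 0)) (0, 0)
                  (t.2.1 + da.2, t.2.2 - da.1)
                else (t.2.1, t.2.2)
              (if lr.1 = lr.2 ∧ lower_P = upper_P then t.1 + 1 else t.1, lr.1, lr.2))
            (s.1, 0,
              (PySem.List.pyRange 1 ((PySem.List.pyGetD A 0 []).length : Int) 1).foldl
                (fun acc i => (PySem.List.pyRange 0 (A.length : Int) 1).foldl
                    (fun acc2 j => acc2 + PySem.List.pyGetD (PySem.List.pyGetD A j []) i 0) acc) 0)
        (inner.1, upper_P, lower_P))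
      (0, 0,
        (PySem.List.pyRange 0 (A.length : Int) 1).foldl
          (fun acc i => acc + (PySem.List.pyGetD A i []).sum) 0)).1 = _
  rw [lower0_eq A, rq_eq A ((PySem.List.pyGetD A 0 []).length : Int),
      outerstep_eq A ((PySem.List.pyRange 1 ((PySem.List.pyGetD A 0 []).length : Int) 1).map (cS A)).sum,
      outer_fst (gS A) _ _ 0 A.length, zero_add]

theorem solutionB_char (A : List (List Int)) :
    solution_alt A
    = cntI (gS A) ((A.map (fun r => r.sum)).sum) A.length
      * cntI (cS A)
          (((PySem.List.pyRange 0 ((PySem.List.pyGetD A 0 []).length : Int) 1).map (cS A)).sum)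
          (PySem.List.pyGetD A 0 []).length := by
  show countBalanced (A.map (fun r => r.sum))
      * countBalanced ((PySem.List.pyRange 0 ((PySem.List.pyGetD A 0 []).length : Int) 1).map
          (fun j => (A.map (fun r => PySem.List.pyGetD r j 0)).sum)) = _
  rw [show (fun j => (A.map (fun r => PySem.List.pyGetD r j 0)).sum) = cS A from rfl,
      ← rowmap_eq A,
      countBalanced_map (gS A) A.length,
      countBalanced_map (cS A) (PySem.List.pyGetD A 0 []).length,
      rowmap_eq A]

theorem final_eq (A : List (List Int)) : solution A = solution_alt A := by
  rw [solutionA_char, solutionB_char, cntO_eq_cntI]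
  rcases Nat.eq_zero_or_pos (PySem.List.pyGetD A 0 []).length with h0 | hpos
  · rw [h0]
    simp [cntI]
  · have hT : ((PySem.List.pyRange 0 ((PySem.List.pyGetD A 0 []).length : Int) 1).map (cS A)).sum
        = cS A 0 + ((PySem.List.pyRange 1 ((PySem.List.pyGetD A 0 []).length : Int) 1).map (cS A)).sum := by
      rw [PySem.List.pyRange_one_cons (by exact_mod_cast hpos)]
      norm_num
    rw [hT]

-- ===== VERDICT (by name: the statement is the Claim_ definition above) =====
theorem solution_spec : Claim_equal_solution := by
  intro A _ _
  unfold Spec_solution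
  exact final_eq A
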